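-- pv_equiv track=rewrite | github.com/r8114wjbn9118/optifine_model_separate | generate_properties.py | sort_charactor_models_connection_key
-- ===== SOURCE A (Python) =====
-- def sort_charactor_models_connection_key(keys):
-- 	n_l = []
-- 	s_l = []
-- 	for key in keys:
-- 		if key == "":
-- 			continue
-- 		try:
-- 			value = int(key)
-- 			n_l.append(value)
-- 		except:
-- 			s_l.append(key)
--
-- 	n_l.sort()
--
-- 	for i in range(len(n_l)):
-- 		n_l[i] = str(n_l[i])
--
-- 	return n_l + s_l
-- ===== SOURCE B (Python) =====
-- def sort_charactor_models_connection_key(keys):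
-- 	def _key(k):
-- 		try:
-- 			return (0, int(k))
-- 		except ValueError:
-- 			return (1, 0)
--
-- 	def _show(k):
-- 		try:
-- 			return str(int(k))
-- 		except ValueError:
-- 			return k
--
-- 	kept = sorted((k for k in keys if k != ""), key=_key)
-- 	return [_show(k) for k in kept]
-- ===== Notes on version B (the rewrite author's own statement) =====
-- stated objective: alternative
-- what changed: Replaces the two-bucket partition (append ints to one list, strings to another, sort the int list, convert, concatenate) with a single stable sort of the non-empty keys under the composite key (0, int(k)) / (1, 0) followed by one rendering pass; stability puts non-numeric keys after all numeric ones in original order, so the buckets disappear.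
import Mathlib
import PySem

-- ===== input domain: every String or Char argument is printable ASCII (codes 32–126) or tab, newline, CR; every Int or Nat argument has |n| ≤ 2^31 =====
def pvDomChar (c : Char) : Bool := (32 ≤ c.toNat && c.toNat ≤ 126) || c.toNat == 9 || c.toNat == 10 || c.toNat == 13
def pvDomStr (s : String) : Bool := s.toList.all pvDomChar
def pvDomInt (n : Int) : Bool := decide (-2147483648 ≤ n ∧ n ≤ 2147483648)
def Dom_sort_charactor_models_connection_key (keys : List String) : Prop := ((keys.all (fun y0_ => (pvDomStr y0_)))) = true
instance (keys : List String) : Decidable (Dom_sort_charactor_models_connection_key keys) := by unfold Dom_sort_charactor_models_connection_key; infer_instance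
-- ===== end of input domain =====

-- B replaces A's two-bucket partition + int sort + concatenation by ONE stable sort of the
-- non-empty keys under the composite key (0, int(k)) / (1, 0) followed by a rendering pass
-- (objective: alternative decomposition, same asymptotic cost).

-- ===== PORT A =====
-- the in-place `for i in range(len(n_l)): n_l[i] = str(n_l[i])` loop is ported as a map over the list
def pvStepA (p : List Int × List String) (key : String) : List Int × List String :=
  if key == "" then p
  else match PySem.Int.ofStr? key with
    | some value => (p.1 ++ [value], p.2)
    | none => (p.1, p.2 ++ [key])

def sort_charactor_models_connection_key (keys : List String) : List String :=
  (PySem.List.sorted (keys.foldl pvStepA ([], [])).1 (fun x => x)).map PySem.Int.toStr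
    ++ (keys.foldl pvStepA ([], [])).2

-- ===== PORT B =====
-- _key(k) = (0, int(k)) if k parses as an int else (1, 0)  (try/except int(k))
def pvKey1 (k : String) : Int := match PySem.Int.ofStr? k with | some _ => 0 | none => 1
def pvKey2 (k : String) : Int := match PySem.Int.ofStr? k with | some v => v | none => 0
-- _show(k) = str(int(k)) if k parses as an int else k
def pvShow (k : String) : String :=
  match PySem.Int.ofStr? k with | some v => PySem.Int.toStr v | none => k

def sort_charactor_models_connection_key_alt (keys : List String) : List String :=
  (PySem.List.sorted2 (keys.filter (fun k => k != "")) pvKey1 pvKey2).map pvShow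

-- ===== PRECONDITION & SPEC =====
def Spec_sort_charactor_models_connection_key (keys : List String) (out : List String) : Prop := out = sort_charactor_models_connection_key_alt keys
instance (keys : List String) (out : List String) : Decidable (Spec_sort_charactor_models_connection_key keys out) := by unfold Spec_sort_charactor_models_connection_key; infer_instance

-- ===== CLAIM (what is proved, stated in full; the proofs are below) =====
def Claim_equal_sort_charactor_models_connection_key : Prop := ∀ (keys : List String), Dom_sort_charactor_models_connection_key keys → Spec_sort_charactor_models_connection_key keys (sort_charactor_models_connection_key keys)

-- ===== LEMMAS AND PROOFS =====

-- abbreviations used only by the proofs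
def pvIsNum (k : String) : Bool := (PySem.Int.ofStr? k).isSome
def pvLtB (a b : String) : Bool :=
  decide (pvKey1 a < pvKey1 b) || (!decide (pvKey1 b < pvKey1 a) && decide (pvKey2 a < pvKey2 b))
def pvIns2 (acc : List String) (x : String) : List String := PySem.List.insertBy pvLtB x acc
def pvInsI (acc : List Int) (v : Int) : List Int :=
  PySem.List.insertBy (fun a b => decide (a < b)) v acc

lemma pv_insertBy_cons {α : Type} (b : α → α → Bool) (x y : α) (ys : List α) :
    PySem.List.insertBy b x (y :: ys) = if b x y then x :: y :: ys else y :: PySem.List.insertBy b x ys := rfl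

lemma pv_sorted2_eq (xs : List String) :
    PySem.List.sorted2 xs pvKey1 pvKey2 = xs.foldl pvIns2 [] := rfl

lemma pv_sorted_eq (xs : List Int) :
    PySem.List.sorted xs (fun x => x) = xs.foldl pvInsI [] := by
  simpa [pvInsI] using PySem.List.sorted_eq_foldl_insertBy xs (fun x => x)

-- a non-numeric key is never placed before anything
lemma pvLtB_nonnum_left (x y : String) (hx : pvIsNum x = false) : pvLtB x y = false := by
  unfold pvLtB pvKey1 pvKey2
  unfold pvIsNum at hx
  cases hox : PySem.Int.ofStr? x with
  | none => cases hoy : PySem.Int.ofStr? y <;> simp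
  | some v => simp [hox] at hx

lemma pv_ins_nonnum (x : String) (l : List String) (hx : pvIsNum x = false) :
    pvIns2 l x = l ++ [x] := by
  exact PySem.List.insertBy_of_forall_not_before pvLtB x l (fun y _ => pvLtB_nonnum_left x y hx)

-- a numeric key inserted into (numerics ++ non-numerics) stays left of the non-numerics
lemma pv_ins_num_append (x : String) (N S : List String)
    (hx : pvIsNum x = true) (hS : ∀ y ∈ S, pvIsNum y = false) :
    pvIns2 (N ++ S) x = pvIns2 N x ++ S := by
  induction N with
  | nil =>
    cases S with
    | nil => rfl
    | cons y ys =>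
      have hy := hS y (by simp)
      have hxy : pvLtB x y = true := by
        unfold pvIsNum at hx hy
        unfold pvLtB pvKey1
        cases hox : PySem.Int.ofStr? x with
        | none => simp [hox] at hx
        | some v =>
          cases hoy : PySem.Int.ofStr? y with
          | none => simp
          | some w => simp [hoy] at hy
      simp [pvIns2, PySem.List.insertBy, hxy]
  | cons n N' ih =>
    by_cases h : pvLtB x n = true
    · simp [pvIns2, PySem.List.insertBy, h]
    · have h' : pvLtB x n = false := by simpa using h
      simp only [List.cons_append, pvIns2, PySem.List.insertBy, h']
      simpa [pvIns2] using congrArg (n :: ·) ih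

-- between two numeric keys the composite order is the int order of their values
lemma pvLtB_num (x y : String) (hx : pvIsNum x = true) (hy : pvIsNum y = true) :
    pvLtB x y = decide (pvKey2 x < pvKey2 y) := by
  unfold pvIsNum at hx hy
  unfold pvLtB pvKey1
  cases hox : PySem.Int.ofStr? x with
  | none => simp [hox] at hx
  | some v =>
    cases hoy : PySem.Int.ofStr? y with
    | none => simp [hoy] at hy
    | some w => simp

lemma pv_map_key2_ins (x : String) (N : List String)
    (hx : pvIsNum x = true) (hN : ∀ y ∈ N, pvIsNum y = true) :
    (pvIns2 N x).map pvKey2 = pvInsI (N.map pvKey2) (pvKey2 x) := by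
  induction N with
  | nil => rfl
  | cons y N' ih =>
    have hy := hN y (by simp)
    have hN' : ∀ z ∈ N', pvIsNum z = true := fun z hz => hN z (by simp [hz])
    have hxy := pvLtB_num x y hx hy
    by_cases h : pvKey2 x < pvKey2 y
    · simp [pvIns2, pvInsI, PySem.List.insertBy, hxy, h]
    · have hxyf : pvLtB x y = false := by rw [hxy]; simpa using h
      have h2 : decide (pvKey2 x < pvKey2 y) = false := by simpa using h
      simp only [pvIns2, pvInsI] at *
      rw [pv_insertBy_cons, hxyf, List.map_cons, pv_insertBy_cons, h2]
      simp only [Bool.false_eq_true, if_false, List.map_cons]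
      exact congrArg (pvKey2 y :: ·) (ih hN')

lemma pv_mem_ins2 (x y : String) (N : List String) :
    y ∈ pvIns2 N x ↔ y = x ∨ y ∈ N := PySem.List.mem_insertBy pvLtB x y N

-- the stable composite-key insertion fold splits into a numeric fold followed by the
-- non-numeric keys in order
lemma pv_partition (F : List String) : ∀ (N S : List String),
    (∀ y ∈ N, pvIsNum y = true) → (∀ y ∈ S, pvIsNum y = false) →
    F.foldl pvIns2 (N ++ S) =
      (F.filter (fun k => pvIsNum k)).foldl pvIns2 N ++ (S ++ F.filter (fun k => !pvIsNum k)) := by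
  induction F with
  | nil => intro N S _ _; simp
  | cons x F' ih =>
    intro N S hN hS
    by_cases hx : pvIsNum x = true
    · have step : pvIns2 (N ++ S) x = pvIns2 N x ++ S := pv_ins_num_append x N S hx hS
      have hN' : ∀ y ∈ pvIns2 N x, pvIsNum y = true := by
        intro y hy
        rcases (pv_mem_ins2 x y N).1 hy with h | h
        · exact h ▸ hx
        · exact hN y h
      simp only [List.foldl_cons, step, List.filter_cons, hx]
      simpa using ih (pvIns2 N x) S hN' hS
    · have hx' : pvIsNum x = false := by simpa using hx
      have step : pvIns2 (N ++ S) x = N ++ (S ++ [x]) := by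
        rw [pv_ins_nonnum x (N ++ S) hx', List.append_assoc]
      have hS' : ∀ y ∈ S ++ [x], pvIsNum y = false := by
        intro y hy
        rcases List.mem_append.1 hy with h | h
        · exact hS y h
        · simp at h; exact h ▸ hx'
      simp only [List.foldl_cons, step, List.filter_cons, hx']
      rw [ih N (S ++ [x]) hN hS']
      simp

-- mapping the parsed value through the numeric fold gives the plain int insertion fold
lemma pv_num_fold (G : List String) : ∀ (N : List String),
    (∀ y ∈ G, pvIsNum y = true) → (∀ y ∈ N, pvIsNum y = true) →
    (G.foldl pvIns2 N).map pvKey2 = (G.map pvKey2).foldl pvInsI (N.map pvKey2) := by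
  induction G with
  | nil => intro N _ _; rfl
  | cons x G' ih =>
    intro N hG hN
    have hx : pvIsNum x = true := hG x (by simp)
    have hG' : ∀ y ∈ G', pvIsNum y = true := fun y hy => hG y (by simp [hy])
    have hN' : ∀ y ∈ pvIns2 N x, pvIsNum y = true := by
      intro y hy
      rcases (pv_mem_ins2 x y N).1 hy with h | h
      · exact h ▸ hx
      · exact hN y h
    simp only [List.foldl_cons, List.map_cons]
    rw [ih (pvIns2 N x) hG' hN', pv_map_key2_ins x N hx hN]

-- parsed values of the numeric keys = filterMap of the parser
lemma pv_filter_map (F : List String) :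
    (F.filter (fun k => pvIsNum k)).map pvKey2 = F.filterMap PySem.Int.ofStr? := by
  induction F with
  | nil => rfl
  | cons x F' ih =>
    cases hox : PySem.Int.ofStr? x with
    | none =>
      have hxv : pvIsNum x = false := by simp [pvIsNum, hox]
      simp [hxv, hox, ih]
    | some v =>
      have hxv : pvIsNum x = true := by simp [pvIsNum, hox]
      have hk : pvKey2 x = v := by simp [pvKey2, hox]
      simp [hxv, hox, hk, ih]

-- A's accumulating loop, with the empty-string skip, in closed form
lemma pv_a_fold (keys : List String) : ∀ (ns : List Int) (ss : List String),
    keys.foldl pvStepA (ns, ss) =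
    (ns ++ (keys.filter (fun k => k != "")).filterMap PySem.Int.ofStr?,
     ss ++ ((keys.filter (fun k => k != "")).filter (fun k => !pvIsNum k))) := by
  induction keys with
  | nil => intro ns ss; simp
  | cons x keys' ih =>
    intro ns ss
    rw [List.foldl_cons]
    by_cases hx : x = ""
    · have hb : (x == "") = true := by simp [hx]
      have hbn : (x != "") = false := by simp [hx]
      rw [show pvStepA (ns, ss) x = (ns, ss) by simp [pvStepA, hb], ih,
        List.filter_cons, hbn]
      simp
    · have hb : (x == "") = false := by simpa using hx
      have hbn : (x != "") = true := by simp [hx]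
      cases hox : PySem.Int.ofStr? x with
      | some v =>
        have hxv : pvIsNum x = true := by simp [pvIsNum, hox]
        rw [show pvStepA (ns, ss) x = (ns ++ [v], ss) by simp [pvStepA, hb, hox], ih,
          List.filter_cons, hbn]
        simp [hox, hxv]
      | none =>
        have hxv : pvIsNum x = false := by simp [pvIsNum, hox]
        rw [show pvStepA (ns, ss) x = (ns, ss ++ [x]) by simp [pvStepA, hb, hox], ih,
          List.filter_cons, hbn]
        simp [hox, hxv]

lemma pv_show_num (k : String) (h : pvIsNum k = true) :
    pvShow k = PySem.Int.toStr (pvKey2 k) := by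
  unfold pvIsNum at h
  unfold pvShow pvKey2
  cases hok : PySem.Int.ofStr? k with
  | none => simp [hok] at h
  | some v => simp

lemma pv_show_nonnum (k : String) (h : pvIsNum k = false) : pvShow k = k := by
  unfold pvIsNum at h
  unfold pvShow
  cases hok : PySem.Int.ofStr? k with
  | none => simp
  | some v => simp [hok] at h

-- ===== VERDICT (by name: the statement is the Claim_ definition above) =====
theorem sort_charactor_models_connection_key_spec : Claim_equal_sort_charactor_models_connection_key := by
  intro keys _
  unfold Spec_sort_charactor_models_connection_key
  unfold sort_charactor_models_connection_key sort_charactor_models_connection_key_alt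
  set F := keys.filter (fun k => k != "") with hF
  rw [pv_sorted2_eq, pv_a_fold keys [] []]
  have hpart := pv_partition F [] [] (by simp) (by simp)
  simp only [List.nil_append, List.append_nil] at hpart
  rw [hpart]
  have hGnum : ∀ y ∈ (F.filter (fun k => pvIsNum k)).foldl pvIns2 [], pvIsNum y = true := by
    intro y hy
    have hperm : ((F.filter (fun k => pvIsNum k)).foldl pvIns2 []).Perm
        (F.filter (fun k => pvIsNum k)) := by
      simpa [pv_sorted2_eq] using
        PySem.List.sorted2_perm (F.filter (fun k => pvIsNum k)) pvKey1 pvKey2 false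
    have := hperm.mem_iff.1 hy
    simpa using (List.mem_filter.1 this).2
  rw [List.map_append]
  congr 1
  · -- numeric part
    have h1 : ((F.filter (fun k => pvIsNum k)).foldl pvIns2 []).map pvShow
        = ((F.filter (fun k => pvIsNum k)).foldl pvIns2 []).map
            (fun k => PySem.Int.toStr (pvKey2 k)) :=
      List.map_congr_left (fun y hy => pv_show_num y (hGnum y hy))
    rw [h1, show (fun k => PySem.Int.toStr (pvKey2 k)) = PySem.Int.toStr ∘ pvKey2 from rfl,
      List.map_map.symm]
    rw [pv_num_fold (F.filter (fun k => pvIsNum k)) []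
        (fun y hy => by simpa using (List.mem_filter.1 hy).2) (by simp)]
    rw [pv_filter_map F, pv_sorted_eq]
    simp [← hF]
  · -- non-numeric part
    simp only [List.nil_append, ← hF]
    have h := List.map_congr_left (l := List.filter (fun k => !pvIsNum k) F)
        (f := pvShow) (g := fun y => y) (fun y hy => by
          simp only [List.mem_filter] at hy
          exact pv_show_nonnum y (by simpa using hy.2))
    rw [h]
    simp
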